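-- pv_equiv track=rewrite | github.com/anonymized-Git4915/Sampling | sampling/sampling_RP_and_AB.py | _get_list_of_pairs
-- ===== SOURCE A (Python) =====
-- def _get_list_of_pairs(preprocessed_event_log):
--
--     list_of_pairs = []
--     for variant in preprocessed_event_log:
--         # variant[1] mal:
--         for i in range(variant[1]):
--             x = list(zip(variant[0], variant[0][1:]))
--             list_of_pairs.append(x)
--     # clean the pairs of brackets TODO:
--     list_of_pairs_formated = []
--     for i in list_of_pairs:
--         for k in i:
--             list_of_pairs_formated.append(k)
--
--     return list_of_pairs_formated
-- ===== SOURCE B (Python) =====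
-- def _get_list_of_pairs(preprocessed_event_log):
--     out = []
--     for seq, count in preprocessed_event_log:
--         m = len(seq) - 1
--         if m > 0 and count > 0:
--             # one flat loop over all m*count output positions; modular index
--             # arithmetic replaces the repeat loop, the zip and the flatten pass
--             for j in range(m * count):
--                 i = j % m
--                 out.append((seq[i], seq[i + 1]))
--     return out
-- ===== Notes on version B (the rewrite author's own statement) =====
-- stated objective: alternative
-- what changed: B replaces A's build-nested-list-of-zips-then-flatten (three loop levels plus a second double-loop pass) by a single flat loop per variant over all m*count output positions, computing each pair directly by modular index arithmetic (i = j % (len(seq)-1)) with no zip, no repetition loop and no intermediate nested list.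
import Mathlib
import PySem

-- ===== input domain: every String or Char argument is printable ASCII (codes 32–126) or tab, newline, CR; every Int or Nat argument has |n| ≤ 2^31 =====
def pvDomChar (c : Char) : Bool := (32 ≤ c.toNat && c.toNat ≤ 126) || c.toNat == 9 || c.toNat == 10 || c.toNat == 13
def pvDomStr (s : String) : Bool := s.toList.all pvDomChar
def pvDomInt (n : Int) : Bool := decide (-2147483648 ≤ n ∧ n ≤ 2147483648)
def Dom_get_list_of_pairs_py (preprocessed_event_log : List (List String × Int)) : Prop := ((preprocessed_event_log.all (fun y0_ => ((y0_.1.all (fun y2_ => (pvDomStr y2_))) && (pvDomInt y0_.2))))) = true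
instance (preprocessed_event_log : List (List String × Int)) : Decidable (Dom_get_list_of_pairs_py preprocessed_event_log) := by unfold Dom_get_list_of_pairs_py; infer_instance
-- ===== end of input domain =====

-- B produces each pair directly by modular index arithmetic in one flat loop per variant, instead of A's nested zip-per-repeat list build plus a separate flattening double loop (alternative decomposition, same cost).

-- ===== PORT A =====
-- Port of A: builds the nested list (one zip per repeat), then flattens with a double loop.
def get_list_of_pairs_py (preprocessed_event_log : List (List String × Int)) : List (String × String) :=
  let list_of_pairs : List (List (String × String)) :=
    preprocessed_event_log.foldl (fun acc variant =>
      (PySem.List.pyRange 0 variant.2 1).foldl (fun acc _ =>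
        acc ++ [variant.1.zip (variant.1.drop 1)]) acc) []
  list_of_pairs.foldl (fun acc i =>
    i.foldl (fun acc k => acc ++ [k]) acc) []

-- ===== PORT B =====
-- Port of B: one flat loop of m*count steps per variant, pair at position j taken at
-- index j % m.  Python's seq[i] / seq[i+1] are ported with pyGetD: under the guard
-- 0 < m ∧ 0 < count the indices are always in range, so this is exact.
def get_list_of_pairs_py_alt (preprocessed_event_log : List (List String × Int)) : List (String × String) :=
  preprocessed_event_log.foldl (fun out v =>
    let seq := v.1
    let m : Int := (seq.length : Int) - 1
    if 0 < m ∧ 0 < v.2 then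
      (PySem.List.pyRange 0 (m * v.2) 1).foldl (fun out j =>
        let i := PySem.Int.mod j m
        out ++ [(PySem.List.pyGetD seq i "", PySem.List.pyGetD seq (i + 1) "")]) out
    else out) []

-- ===== PRECONDITION & SPEC =====
def Spec_get_list_of_pairs_py (preprocessed_event_log : List (List String × Int)) (out : List (String × String)) : Prop := out = get_list_of_pairs_py_alt preprocessed_event_log
instance (preprocessed_event_log : List (List String × Int)) (out : List (String × String)) : Decidable (Spec_get_list_of_pairs_py preprocessed_event_log out) := by unfold Spec_get_list_of_pairs_py; infer_instance

-- ===== CLAIM (what is proved, stated in full; the proofs are below) =====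
def Claim_equal_get_list_of_pairs_py : Prop := ∀ (preprocessed_event_log : List (List String × Int)), Dom_get_list_of_pairs_py preprocessed_event_log → Spec_get_list_of_pairs_py preprocessed_event_log (get_list_of_pairs_py preprocessed_event_log)

-- ===== LEMMAS AND PROOFS =====

-- the common value both sides compute: per variant, the adjacent-pair list repeated count times
def pvBlock (v : List String × Int) : List (String × String) :=
  (List.replicate v.2.toNat (v.1.zip (v.1.drop 1))).flatten

-- fold that appends map-singletons = append the map
lemma appendFold {α β : Type} (f : β → α) : ∀ (l : List β) (acc : List α),
    l.foldl (fun a k => a ++ [f k]) acc = acc ++ l.map f := by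
  intro l; induction l with
  | nil => simp
  | cons x xs ih => intro acc; rw [List.foldl_cons, ih]; simp

lemma appendFoldId {α : Type} : ∀ (i acc : List α), i.foldl (fun a k => a ++ [k]) acc = acc ++ i := by
  intro i acc
  have := appendFold (id : α → α) i acc
  simpa using this

lemma flattenFold {α : Type} : ∀ (L : List (List α)) (acc : List α),
    L.foldl (fun acc i => i.foldl (fun a k => a ++ [k]) acc) acc = acc ++ L.flatten := by
  intro L; induction L with
  | nil => simp
  | cons x xs ih => intro acc; rw [List.foldl_cons, appendFoldId, ih]; simp

lemma repFold {α β : Type} : ∀ (r : List β) (acc : List (List α)) (x : List α),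
    r.foldl (fun a (_ : β) => a ++ [x]) acc = acc ++ List.replicate r.length x := by
  intro r; induction r with
  | nil => simp
  | cons y ys ih =>
    intro acc x
    rw [List.foldl_cons, ih]
    simp [List.replicate_succ, List.append_assoc]

lemma nestedFold : ∀ (log : List (List String × Int)) (acc : List (List (String × String))),
    log.foldl (fun acc variant =>
      (PySem.List.pyRange 0 variant.2 1).foldl (fun acc _ =>
        acc ++ [variant.1.zip (variant.1.drop 1)]) acc) acc
    = acc ++ (log.map (fun v => List.replicate v.2.toNat (v.1.zip (v.1.drop 1)))).flatten := by
  intro log; induction log with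
  | nil => simp
  | cons v vs ih =>
    intro acc
    rw [List.foldl_cons, repFold, ih]
    simp [PySem.List.length_pyRange_one, List.append_assoc]

lemma flattenMapFlatten {α : Type} : ∀ (L : List (List (List α))),
    (L.map List.flatten).flatten = L.flatten.flatten := by
  intro L; induction L with
  | nil => rfl
  | cons x xs ih => simp [ih]

-- A computes the flat concatenation of the blocks
lemma aChar (log : List (List String × Int)) :
    get_list_of_pairs_py log = (log.map pvBlock).flatten := by
  unfold get_list_of_pairs_py
  rw [nestedFold, flattenFold]
  simp only [List.nil_append]
  rw [← flattenMapFlatten, List.map_map]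
  apply congrArg List.flatten
  apply List.map_congr_left
  intro x _
  simp [pvBlock, List.drop_one]

-- adjacent pairs via indexing
lemma zipPairs : ∀ (seq : List String),
    seq.zip (seq.drop 1)
      = (List.range (seq.length - 1)).map (fun k => (seq.getD k "", seq.getD (k + 1) "")) := by
  intro seq
  match seq with
  | [] => simp
  | [a] => simp
  | a :: b :: t =>
    have ih := zipPairs (b :: t)
    simp only [List.drop_one, List.tail_cons, List.zip_cons_cons] at *
    rw [ih]
    simp [List.range_succ_eq_map, List.map_map, Function.comp_def]

-- the inner flat loop produces c copies of the pair list
lemma innerLoop (seq : List String) (hm : 0 < (seq.length : Int) - 1) :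
    ∀ (c : Nat) (acc : List (String × String)),
    (PySem.List.pyRange 0 (((seq.length : Int) - 1) * (c : Int)) 1).foldl (fun out j =>
        out ++ [(PySem.List.pyGetD seq (PySem.Int.mod j ((seq.length : Int) - 1)) "",
                 PySem.List.pyGetD seq (PySem.Int.mod j ((seq.length : Int) - 1) + 1) "")]) acc
      = acc ++ (List.replicate c (seq.zip (seq.drop 1))).flatten := by
  set m : Int := (seq.length : Int) - 1 with hmdef
  intro c
  induction c with
  | zero => intro acc; simp [PySem.List.pyRange_one_eq_nil]
  | succ c ih =>
    intro acc
    have hsplit : PySem.List.pyRange 0 (m * ((c : Int) + 1)) 1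
        = PySem.List.pyRange 0 (m * (c : Int)) 1 ++ PySem.List.pyRange (m * (c : Int)) (m * ((c : Int) + 1)) 1 := by
      apply PySem.List.pyRange_one_append
      · positivity
      · nlinarith
    have hcast : ((c + 1 : Nat) : Int) = (c : Int) + 1 := by push_cast; ring
    rw [hcast, hsplit, List.foldl_append, ih, appendFold]
    have hrep : (List.replicate (c + 1) (seq.zip (seq.drop 1))).flatten
        = (List.replicate c (seq.zip (seq.drop 1))).flatten ++ seq.zip (seq.drop 1) := by
      rw [List.replicate_succ', List.flatten_append]; simp
    rw [hrep, ← List.append_assoc]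
    congr 1
    -- the last chunk of the range maps to exactly one copy of the pair list
    have hdiff : (m * ((c : Int) + 1) - m * (c : Int)).toNat = m.toNat := by
      have hm' : m * ((c : Int) + 1) - m * (c : Int) = m := by ring
      rw [hm']
    rw [PySem.List.pyRange_one, hdiff, List.map_map, zipPairs]
    have hlen : seq.length - 1 = m.toNat := by omega
    rw [hlen]
    apply List.map_congr_left
    intro k hk
    have hk' : (k : Int) < m := by
      rw [List.mem_range] at hk; omega
    have hmodv : PySem.Int.mod (m * (c : Int) + (k : Int)) m = (k : Int) := by
      rw [PySem.Int.mod_eq_emod_of_pos hm, add_comm, Int.add_mul_emod_self_left]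
      exact Int.emod_eq_of_lt (by positivity) hk'
    simp only [Function.comp_def, hmodv]
    have h1 : PySem.List.pyGetD seq (k : Int) "" = seq.getD k "" := by
      simp [PySem.List.pyGetD_natCast]
    have h2 : PySem.List.pyGetD seq ((k : Int) + 1) "" = seq.getD (k + 1) "" := by
      have : ((k : Int) + 1) = ((k + 1 : Nat) : Int) := by push_cast; ring
      rw [this, PySem.List.pyGetD_natCast]
    rw [h1, h2]

-- each B step appends exactly the variant's block
lemma stepBlock (v : List String × Int) (acc : List (String × String)) :
    (let seq := v.1
     let m : Int := (seq.length : Int) - 1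
     if 0 < m ∧ 0 < v.2 then
       (PySem.List.pyRange 0 (m * v.2) 1).foldl (fun out j =>
         let i := PySem.Int.mod j m
         out ++ [(PySem.List.pyGetD seq i "", PySem.List.pyGetD seq (i + 1) "")]) acc
     else acc)
    = acc ++ pvBlock v := by
  by_cases h : 0 < ((v.1.length : Int) - 1) ∧ 0 < v.2
  · simp only [h, and_self, if_true]
    have hc : v.2 = ((v.2.toNat : Nat) : Int) := by omega
    rw [hc]
    exact innerLoop v.1 h.1 v.2.toNat acc
  · simp only [h, if_false]
    have hblock : pvBlock v = [] := by
      unfold pvBlock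
      rcases not_and_or.mp h with h1 | h2
      · have hz : v.1.zip (v.1.drop 1) = [] := by
          have hl : v.1.length ≤ 1 := by omega
          match v.1, hl with
          | [], _ => rfl
          | [a], _ => rfl
        rw [hz]
        simp
      · have : v.2.toNat = 0 := by omega
        simp [this]
    simp [hblock]

lemma bChar : ∀ (log : List (List String × Int)) (acc : List (String × String)),
    log.foldl (fun out v =>
      let seq := v.1
      let m : Int := (seq.length : Int) - 1
      if 0 < m ∧ 0 < v.2 then
        (PySem.List.pyRange 0 (m * v.2) 1).foldl (fun out j =>
          let i := PySem.Int.mod j m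
          out ++ [(PySem.List.pyGetD seq i "", PySem.List.pyGetD seq (i + 1) "")]) out
      else out) acc
    = acc ++ (log.map pvBlock).flatten := by
  intro log; induction log with
  | nil => simp
  | cons v vs ih =>
    intro acc
    rw [List.foldl_cons]
    rw [stepBlock v acc] at *
    rw [ih]
    simp [List.append_assoc]

-- ===== VERDICT =====
theorem get_list_of_pairs_py_spec : Claim_equal_get_list_of_pairs_py := by
  intro log _
  unfold Spec_get_list_of_pairs_py get_list_of_pairs_py_alt
  rw [aChar, bChar]
  simp
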